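-- pv_equiv track=rewrite | github.com/HenriqueBBrum/Pre-filtering-Simulator | src/nids_parser/match.py | __parse_pcre_modifiers
-- ===== SOURCE A (Python) =====
-- pcre_modifier_to_buffer = {"U":"http_uri", "I": "http_raw_uri",
--                            "P": "http_body", "Q": "http_body",
--                            "H": "http_header", "D": "http_raw_header",
--                            "M": "http_method", "C": "http_cookie",
--                            "S": "http_stat_code", "Y": "http_stat_msg",
--                            "V": "http_user_agent", "W": "http_host"}
--
-- native_pcre_modifiers = {'i', 's', 'm', 'x'}
--
-- def __parse_pcre_modifiers(pcre_string, modifiers):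
--     relative_match = False
--     buffer_name = None
--
--     if not modifiers:
--         return pcre_string, relative_match, buffer_name
--
--     if len(set(modifiers)) != len(modifiers):
--         raise Exception("PCRE string with duplicate modifiers, fix it. PCRE: ", pcre_string, " modifiers: ", modifiers)
--
--     prepend_modifiers = ""
--     for char in modifiers:
--         if char in native_pcre_modifiers:
--             prepend_modifiers+=char
--         elif char == 'A' and pcre_string[0] != '^':
--             pcre_string = '^' + pcre_string
--         elif char == 'R':
--             relative_match = True
--         elif char in pcre_modifier_to_buffer:
--             buffer_name = pcre_modifier_to_buffer[char]
--
--     if prepend_modifiers: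
--         pcre_string = "(?"+prepend_modifiers+')'+pcre_string
--
--     return pcre_string, relative_match, buffer_name
-- ===== SOURCE B (Python) =====
-- pcre_modifier_to_buffer = {"U":"http_uri", "I": "http_raw_uri",
--                            "P": "http_body", "Q": "http_body",
--                            "H": "http_header", "D": "http_raw_header",
--                            "M": "http_method", "C": "http_cookie",
--                            "S": "http_stat_code", "Y": "http_stat_msg",
--                            "V": "http_user_agent", "W": "http_host"}
--
-- native_pcre_modifiers = {'i', 's', 'm', 'x'}
--
-- def __parse_pcre_modifiers(pcre_string, modifiers):
--     if not modifiers: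
--         return pcre_string, False, None
--
--     if len(set(modifiers)) != len(modifiers):
--         raise Exception("PCRE string with duplicate modifiers, fix it. PCRE: ", pcre_string, " modifiers: ", modifiers)
--
--     prepend_modifiers = "".join(c for c in modifiers if c in native_pcre_modifiers)
--     relative_match = 'R' in modifiers
--     buffer_name = next((pcre_modifier_to_buffer[c] for c in reversed(modifiers)
--                         if c in pcre_modifier_to_buffer), None)
--
--     if 'A' in modifiers and pcre_string[0] != '^':
--         pcre_string = '^' + pcre_string
--     if prepend_modifiers:
--         pcre_string = "(?" + prepend_modifiers + ")" + pcre_string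
--
--     return pcre_string, relative_match, buffer_name
-- ===== Notes on version B (the rewrite author's own statement) =====
-- stated objective: simpler
-- what changed: A's single stateful multi-branch scan is replaced by independent passes: a filter-join for the native flags, membership tests for 'R' and 'A', and a reversed-scan first-match (last-wins) lookup for the buffer name.
import Mathlib
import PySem

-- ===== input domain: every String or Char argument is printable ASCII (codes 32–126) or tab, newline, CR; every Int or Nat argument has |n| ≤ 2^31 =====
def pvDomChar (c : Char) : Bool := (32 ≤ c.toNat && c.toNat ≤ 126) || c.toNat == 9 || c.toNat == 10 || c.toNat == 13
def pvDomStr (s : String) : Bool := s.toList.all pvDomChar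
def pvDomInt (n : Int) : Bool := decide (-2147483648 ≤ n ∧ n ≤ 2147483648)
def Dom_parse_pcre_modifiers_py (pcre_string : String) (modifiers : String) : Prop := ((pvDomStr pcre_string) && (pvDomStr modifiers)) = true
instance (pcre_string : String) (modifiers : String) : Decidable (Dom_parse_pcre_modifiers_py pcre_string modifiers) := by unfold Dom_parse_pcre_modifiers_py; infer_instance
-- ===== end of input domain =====

-- B replaces A's single stateful multi-branch scan by independent passes (filter for native
-- flags, membership tests for 'R'/'A', reversed first-match for the buffer): simpler.

-- shared module constants (Python: pcre_modifier_to_buffer, native_pcre_modifiers)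
def pmBuffer (c : Char) : Option String :=
  if c = 'U' then some "http_uri" else if c = 'I' then some "http_raw_uri"
  else if c = 'P' then some "http_body" else if c = 'Q' then some "http_body"
  else if c = 'H' then some "http_header" else if c = 'D' then some "http_raw_header"
  else if c = 'M' then some "http_method" else if c = 'C' then some "http_cookie"
  else if c = 'S' then some "http_stat_code" else if c = 'Y' then some "http_stat_msg"
  else if c = 'V' then some "http_user_agent" else if c = 'W' then some "http_host"
  else none

def nativeMod (c : Char) : Bool := c = 'i' || c = 's' || c = 'm' || c = 'x'

-- ===== PORT A =====
-- one loop iteration of A: state is (pcre_string chars, prepend_modifiers, relative_match, buffer_name)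
def stepA (st : List Char × List Char × Bool × Option String) (c : Char) :
    List Char × List Char × Bool × Option String :=
  let (ps, pre, rel, buf) := st
  if nativeMod c then (ps, pre ++ [c], rel, buf)
  else if c = 'A' then
    match ps with
    | [] => (ps, pre, rel, buf)   -- Python raises IndexError on pcre_string[0]; excluded by Pre_
    | h :: t => if h ≠ '^' then ('^' :: h :: t, pre, rel, buf) else (ps, pre, rel, buf)
  else if c = 'R' then (ps, pre, true, buf)
  else match pmBuffer c with
    | some b => (ps, pre, rel, some b)
    | none => (ps, pre, rel, buf)

def parse_pcre_modifiers_py (pcre_string : String) (modifiers : String) : String × Bool × Option String :=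
  if modifiers = "" then (pcre_string, false, none)
  else
    -- Python raises on duplicate modifiers (len(set(..)) != len(..)); those inputs are outside Pre_
    let st := modifiers.toList.foldl stepA (pcre_string.toList, [], false, none)
    let ps := if st.2.1 ≠ [] then '(' :: '?' :: (st.2.1 ++ ')' :: st.1) else st.1
    (String.ofList ps, st.2.2.1, st.2.2.2)

-- ===== PORT B =====
-- B's `'A' in modifiers and pcre_string[0] != '^'` prepend ([] = Python IndexError, outside Pre_)
def applyCaret (ps : List Char) : List Char :=
  match ps with
  | [] => ps
  | h :: t => if h = '^' then h :: t else '^' :: h :: t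

def parse_pcre_modifiers_py_alt (pcre_string : String) (modifiers : String) : String × Bool × Option String :=
  if modifiers = "" then (pcre_string, false, none)
  else
    let ms := modifiers.toList
    let pre := ms.filter nativeMod
    let rel := ms.contains 'R'
    let buf := ms.reverse.findSome? pmBuffer
    let ps := if ms.contains 'A' then applyCaret pcre_string.toList else pcre_string.toList
    let ps := if pre ≠ [] then '(' :: '?' :: (pre ++ ')' :: ps) else ps
    (String.ofList ps, rel, buf)

-- ===== PRECONDITION & SPEC =====
-- Pre_ excludes exactly the inputs where A raises: duplicate modifier characters (explicit
-- Exception) and modifiers containing 'A' with empty pcre_string (IndexError); B raises there too.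
def Pre_parse_pcre_modifiers_py (pcre_string : String) (modifiers : String) : Prop :=
  modifiers.toList.Nodup ∧ (modifiers.toList.contains 'A' → pcre_string ≠ "")
instance (pcre_string : String) (modifiers : String) : Decidable (Pre_parse_pcre_modifiers_py pcre_string modifiers) := by unfold Pre_parse_pcre_modifiers_py; infer_instance

def pvWitness_parse_pcre_modifiers_py : String × String := ("ab.c", "iAR U")

def Spec_parse_pcre_modifiers_py (pcre_string : String) (modifiers : String) (out : String × Bool × Option String) : Prop := out = parse_pcre_modifiers_py_alt pcre_string modifiers
instance (pcre_string : String) (modifiers : String) (out : String × Bool × Option String) : Decidable (Spec_parse_pcre_modifiers_py pcre_string modifiers out) := by unfold Spec_parse_pcre_modifiers_py; infer_instance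

-- ===== CLAIM (what is proved, stated in full; the proofs are below) =====
def Claim_equal_parse_pcre_modifiers_py : Prop := ∀ (pcre_string : String) (modifiers : String), Dom_parse_pcre_modifiers_py pcre_string modifiers → Pre_parse_pcre_modifiers_py pcre_string modifiers → Spec_parse_pcre_modifiers_py pcre_string modifiers (parse_pcre_modifiers_py pcre_string modifiers)

-- ===== LEMMAS AND PROOFS =====

lemma applyCaret_idem (ps : List Char) : applyCaret (applyCaret ps) = applyCaret ps := by
  cases ps with
  | nil => rfl
  | cons h t =>
    by_cases hh : h = '^' <;> simp [applyCaret, hh]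

lemma foldA_spec (l : List Char) (ps pre : List Char) (rel : Bool) (buf : Option String) :
    List.foldl stepA (ps, pre, rel, buf) l =
      ((if l.contains 'A' then applyCaret ps else ps),
       pre ++ l.filter nativeMod,
       rel || l.contains 'R',
       (l.reverse.findSome? pmBuffer).or buf) := by
  induction l generalizing ps pre rel buf with
  | nil => simp
  | cons c l ih =>
    simp only [List.foldl_cons, List.reverse_cons, List.findSome?_append]
    by_cases hnat : nativeMod c = true
    · have hA : ¬ ('A' = c) := by
        simp only [nativeMod, Bool.or_eq_true, decide_eq_true_eq] at hnat
        rcases hnat with ((h|h)|h)|h <;> subst h <;> decide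
      have hR : ¬ ('R' = c) := by
        simp only [nativeMod, Bool.or_eq_true, decide_eq_true_eq] at hnat
        rcases hnat with ((h|h)|h)|h <;> subst h <;> decide
      have hB : pmBuffer c = none := by
        simp only [nativeMod, Bool.or_eq_true, decide_eq_true_eq] at hnat
        rcases hnat with ((h|h)|h)|h <;> subst h <;> decide
      simp [stepA, hnat, ih, hA, hR, List.findSome?, hB]
    · by_cases hA : c = 'A'
      · subst hA
        have hB : pmBuffer 'A' = none := by decide
        have hstep : stepA (ps, pre, rel, buf) 'A' = (applyCaret ps, pre, rel, buf) := by
          cases ps with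
          | nil => simp [stepA, hnat, applyCaret]
          | cons h t =>
            by_cases hh : h = '^' <;> simp [stepA, hnat, applyCaret, hh]
        rw [hstep, ih]
        simp [hnat, List.findSome?, hB, applyCaret_idem]
      · by_cases hR : c = 'R'
        · subst hR
          have hB : pmBuffer 'R' = none := by decide
          simp [stepA, hnat, ih, List.findSome?, hB]
        · have hA' : ¬ ('A' = c) := fun e => hA e.symm
          have hR' : ¬ ('R' = c) := fun e => hR e.symm
          cases hpm : pmBuffer c with
          | none =>
            simp [stepA, hnat, hA, hR, hA', hR', ih, List.findSome?, hpm]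
          | some b =>
            simp [stepA, hnat, hA, hR, hA', hR', ih, List.findSome?, hpm]

-- ===== VERDICT (by name: the statement is the Claim_ definition above) =====
theorem parse_pcre_modifiers_py_spec : Claim_equal_parse_pcre_modifiers_py := by
  intro ps ms _ _
  unfold Spec_parse_pcre_modifiers_py parse_pcre_modifiers_py parse_pcre_modifiers_py_alt
  by_cases h : ms = ""
  · simp [h]
  · simp only [h, if_false, foldA_spec, List.nil_append, Bool.false_or, Option.or_none]
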